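-- pv_equiv track=rewrite | github.com/sp9028/P1 | Rešitve starih izpitov/13.8.1.py | identifikator
-- ===== SOURCE A (Python) =====
-- def identifikator(pozitivni, negativni, fragmenti):
--     naj_razlika = 0
--     naj_fragment = None
--     for fragment in fragmenti:
--         razlika = 0
--         for poz in pozitivni:
--             if fragment in poz:
--                 razlika += 1
--         for neg in negativni:
--             if fragment in neg:
--                 razlika -= 1
--         if razlika > naj_razlika:
--             naj_razlika = razlika
--             naj_fragment = fragment
--     return naj_fragment
-- ===== SOURCE B (Python) =====
-- def identifikator(pozitivni, negativni, fragmenti):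
--     kljuci = list(dict.fromkeys(fragmenti))
--     ocene = [0] * len(kljuci)
--     for dok in pozitivni:
--         ocene = [o + 1 if f in dok else o for f, o in zip(kljuci, ocene)]
--     for dok in negativni:
--         ocene = [o - 1 if f in dok else o for f, o in zip(kljuci, ocene)]
--     naj, naj_ocena = None, 0
--     for f, o in zip(kljuci, ocene):
--         if o > naj_ocena:
--             naj, naj_ocena = f, o
--     return naj
-- ===== Notes on version B (the rewrite author's own statement) =====
-- stated objective: alternative
-- what changed: Inverts the loop nesting: instead of computing each fragment's score to completion with a running best, B dedups the fragments once (dict.fromkeys), maintains one score vector over the distinct fragments that is updated document-by-document (document-major traversal), and only then scans keys/scores in parallel for the first strictly positive maximum.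
import Mathlib
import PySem

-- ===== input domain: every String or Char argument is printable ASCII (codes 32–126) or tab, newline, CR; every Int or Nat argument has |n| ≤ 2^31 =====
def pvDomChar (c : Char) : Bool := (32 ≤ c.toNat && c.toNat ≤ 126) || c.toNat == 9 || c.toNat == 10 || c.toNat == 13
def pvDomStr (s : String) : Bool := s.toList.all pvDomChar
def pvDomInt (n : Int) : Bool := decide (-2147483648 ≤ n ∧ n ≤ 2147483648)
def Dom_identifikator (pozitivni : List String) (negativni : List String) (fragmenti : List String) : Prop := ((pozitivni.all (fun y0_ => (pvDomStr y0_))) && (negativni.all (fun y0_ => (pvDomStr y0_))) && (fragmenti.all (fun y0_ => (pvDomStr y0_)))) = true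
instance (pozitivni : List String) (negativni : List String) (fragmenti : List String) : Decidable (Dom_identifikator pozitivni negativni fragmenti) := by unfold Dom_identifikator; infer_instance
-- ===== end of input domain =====

-- B inverts the loop nesting: it dedups the fragments, keeps one score vector over the distinct
-- fragments updated document-by-document, then scans keys/scores in parallel for the first
-- strictly positive maximum (alternative decomposition, same cost).

-- ===== PORT A =====
def identifikator (pozitivni : List String) (negativni : List String) (fragmenti : List String) : Option String :=
  (fragmenti.foldl (fun (st : Int × Option String) fragment =>
      let razlika : Int :=
        pozitivni.foldl (fun r poz => if PySem.Str.isIn fragment poz then r + 1 else r) 0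
      let razlika : Int :=
        negativni.foldl (fun r neg => if PySem.Str.isIn fragment neg then r - 1 else r) razlika
      if st.1 < razlika then (razlika, some fragment) else st)
    ((0 : Int), (none : Option String))).2

-- ===== PORT B =====
def identifikator_alt (pozitivni : List String) (negativni : List String) (fragmenti : List String) : Option String :=
  let kljuci := PySem.List.dedup fragmenti
  let ocene : List Int := List.replicate kljuci.length 0
  let ocene := pozitivni.foldl (fun oc dok =>
      (kljuci.zip oc).map (fun fo => if PySem.Str.isIn fo.1 dok then fo.2 + 1 else fo.2)) ocene
  let ocene := negativni.foldl (fun oc dok =>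
      (kljuci.zip oc).map (fun fo => if PySem.Str.isIn fo.1 dok then fo.2 - 1 else fo.2)) ocene
  ((kljuci.zip ocene).foldl (fun (st : Option String × Int) fo =>
      if st.2 < fo.2 then (some fo.1, fo.2) else st) ((none : Option String), (0 : Int))).1

-- ===== PRECONDITION & SPEC =====
def Spec_identifikator (pozitivni : List String) (negativni : List String) (fragmenti : List String) (out : Option String) : Prop := out = identifikator_alt pozitivni negativni fragmenti
instance (pozitivni : List String) (negativni : List String) (fragmenti : List String) (out : Option String) : Decidable (Spec_identifikator pozitivni negativni fragmenti out) := by unfold Spec_identifikator; infer_instance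

-- ===== CLAIM (what is proved, stated in full; the proofs are below) =====
def Claim_equal_identifikator : Prop := ∀ (pozitivni : List String) (negativni : List String) (fragmenti : List String), Dom_identifikator pozitivni negativni fragmenti → Spec_identifikator pozitivni negativni fragmenti (identifikator pozitivni negativni fragmenti)

-- ===== LEMMAS AND PROOFS =====

-- the per-fragment score both programs compute
def pvScore (pozitivni negativni : List String) (f : String) : Int :=
  (pozitivni.countP (fun p => PySem.Chars.isIn f.toList p.toList) : Int)
    - (negativni.countP (fun p => PySem.Chars.isIn f.toList p.toList) : Int)

theorem foldl_if_sub_one (p : String → Bool) (l : List String) (a : Int) :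
    l.foldl (fun r x => if p x then r - 1 else r) a = a - (l.countP p : Int) := by
  induction l generalizing a with
  | nil => simp
  | cons x t ih =>
    by_cases h : p x
    · simp [h, ih]; ring
    · simp [h, ih]

theorem scoreA_eq (pozitivni negativni : List String) (f : String) :
    negativni.foldl (fun r neg => if PySem.Str.isIn f neg then r - 1 else r)
      (pozitivni.foldl (fun r poz => if PySem.Str.isIn f poz then r + 1 else r) 0)
    = pvScore pozitivni negativni f := by
  have hfun : PySem.Str.isIn f = fun p => PySem.Chars.isIn f.toList p.toList :=
    funext fun p => PySem.Str.isIn_eq f p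
  rw [PySem.List.foldl_if_add_one, foldl_if_sub_one, pvScore, hfun]
  ring

-- characterisation of A's running-best loop
theorem loopA_char (s : String → Int) (l : List String) (b : Int) (v : Option String) :
    l.foldl (fun (st : Int × Option String) f => if st.1 < s f then (s f, some f) else st) (b, v)
    = if b < (l.map s).foldl max b
      then ((l.map s).foldl max b, l.find? (fun f => s f == (l.map s).foldl max b))
      else (b, v) := by
  induction l generalizing b v with
  | nil => simp
  | cons f t ih =>
    simp only [List.foldl_cons, List.map_cons]
    by_cases h : b < s f
    · have hmax : max b (s f) = s f := max_eq_right h.le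
      have hub : s f ≤ (t.map s).foldl max (s f) := (PySem.List.le_foldl_max (t.map s) (s f)).1
      rw [if_pos h, ih (s f) (some f)]
      have hbM : b < (t.map s).foldl max (max b (s f)) := by rw [hmax]; exact lt_of_lt_of_le h hub
      rw [if_pos hbM, hmax]
      by_cases he : s f = (t.map s).foldl max (s f)
      · rw [if_neg (by omega)]
        rw [List.find?_cons_of_pos (by simpa using he)]
        exact Prod.ext he rfl
      · have hlt : s f < (t.map s).foldl max (s f) := lt_of_le_of_ne hub he
        rw [if_pos hlt, List.find?_cons_of_neg (by simpa using he)]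
    · have hle : s f ≤ b := not_lt.mp h
      have hmax : max b (s f) = b := max_eq_left hle
      rw [if_neg h, ih b v, hmax]
      by_cases hb : b < (t.map s).foldl max b
      · rw [if_pos hb, if_pos hb]
        have hne : s f ≠ (t.map s).foldl max b := by omega
        rw [List.find?_cons_of_neg (by simpa using hne)]
      · rw [if_neg hb, if_neg hb]

-- B's selection loop is A's loop with the two state components swapped
theorem loopB_swap (s : String → Int) (l : List String) (b : Int) (v : Option String) :
    l.foldl (fun (st : Option String × Int) f => if st.2 < s f then (some f, s f) else st) (v, b)
    = (l.foldl (fun (st : Int × Option String) f => if st.1 < s f then (s f, some f) else st) (b, v)).swap := by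
  induction l generalizing b v with
  | nil => simp
  | cons f t ih =>
    simp only [List.foldl_cons]
    by_cases h : b < s f
    · rw [if_pos h, if_pos h, ih]
    · rw [if_neg h, if_neg h, ih]

-- one positive-document pass over a score vector that is a map over the keys
theorem passPlus (K P : List String) (g : String → Int) :
    P.foldl (fun oc dok =>
        (K.zip oc).map (fun fo => if PySem.Str.isIn fo.1 dok then fo.2 + 1 else fo.2)) (K.map g)
    = K.map (fun f => g f + (P.countP (fun d => PySem.Str.isIn f d) : Int)) := by
  induction P generalizing g with
  | nil => simp
  | cons dok t ih =>
    simp only [List.foldl_cons]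
    have hzip : K.zip (K.map g) = K.map (fun f => (f, g f)) := by
      have := List.zip_map' (f := id (α := String)) (g := g) (l := K)
      simpa using this
    rw [hzip, List.map_map]
    have : (fun f => (if PySem.Str.isIn f dok then g f + 1 else g f)) =
        ((fun fo : String × Int => if PySem.Str.isIn fo.1 dok then fo.2 + 1 else fo.2) ∘ (fun f => (f, g f))) := rfl
    rw [← this, ih]
    apply List.map_congr_left
    intro f _
    simp only [PySem.Str.isIn_eq, List.countP_cons]
    split_ifs <;> push_cast <;> ring

-- one negative-document pass
theorem passMinus (K N : List String) (g : String → Int) :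
    N.foldl (fun oc dok =>
        (K.zip oc).map (fun fo => if PySem.Str.isIn fo.1 dok then fo.2 - 1 else fo.2)) (K.map g)
    = K.map (fun f => g f - (N.countP (fun d => PySem.Str.isIn f d) : Int)) := by
  induction N generalizing g with
  | nil => simp
  | cons dok t ih =>
    simp only [List.foldl_cons]
    have hzip : K.zip (K.map g) = K.map (fun f => (f, g f)) := by
      have := List.zip_map' (f := id (α := String)) (g := g) (l := K)
      simpa using this
    rw [hzip, List.map_map]
    have : (fun f => (if PySem.Str.isIn f dok then g f - 1 else g f)) =
        ((fun fo : String × Int => if PySem.Str.isIn fo.1 dok then fo.2 - 1 else fo.2) ∘ (fun f => (f, g f))) := rfl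
    rw [← this, ih]
    apply List.map_congr_left
    intro f _
    simp only [PySem.Str.isIn_eq, List.countP_cons]
    split_ifs <;> push_cast <;> ring

-- removing a dominated element does not change a running max
theorem foldl_max_discard (s : String → Int) (S : List String) (x : String) (b : Int)
    (hx : s x ≤ b) :
    ((PySem.Set.discard S x).map s).foldl max b = (S.map s).foldl max b := by
  induction S generalizing b with
  | nil => simp [PySem.Set.discard]
  | cons y t ih =>
    by_cases h : y = x
    · have : (y == x) = true := by simp [h]
      simp only [PySem.Set.discard, List.filter_cons, this, Bool.not_true, Bool.false_eq_true, if_false, List.map_cons,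
        List.foldl_cons]
      rw [← PySem.Set.discard, ih b hx, h, max_eq_left hx]
    · have : (y == x) = false := by simp [h]
      simp only [PySem.Set.discard, List.filter_cons, this, Bool.not_false, if_true, List.map_cons,
        List.foldl_cons]
      rw [← PySem.Set.discard]
      exact ih (max b (s y)) (le_trans hx (le_max_left _ _))

-- removing an element the predicate rejects does not change find?
theorem find?_discard (p : String → Bool) (S : List String) (x : String) (hx : p x = false) :
    (PySem.Set.discard S x).find? p = S.find? p := by
  induction S with
  | nil => simp [PySem.Set.discard]
  | cons y t ih =>
    by_cases h : y = x
    · have hb : (y == x) = true := by simp [h]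
      simp only [PySem.Set.discard, List.filter_cons, hb, Bool.not_true, Bool.false_eq_true, if_false]
      rw [← PySem.Set.discard, ih, List.find?_cons_of_neg (by rw [h, hx]; simp)]
    · have hb : (y == x) = false := by simp [h]
      simp only [PySem.Set.discard, List.filter_cons, hb, Bool.not_false, if_true]
      by_cases hp : p y
      · rw [List.find?_cons_of_pos hp, List.find?_cons_of_pos hp]
      · rw [List.find?_cons_of_neg (by simpa using hp), List.find?_cons_of_neg (by simpa using hp)]
        rw [← PySem.Set.discard, ih]

-- the max of the scores over the dedup'd fragments equals the max over all fragments
theorem foldl_max_dedup (s : String → Int) (F : List String) (b : Int) :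
    ((PySem.Set.ofList F).map s).foldl max b = (F.map s).foldl max b := by
  induction F generalizing b with
  | nil => simp
  | cons x t ih =>
    rw [PySem.Set.ofList_cons]
    simp only [List.map_cons, List.foldl_cons]
    rw [foldl_max_discard s _ x (max b (s x)) (le_max_right _ _), ih]

-- the first fragment attaining a value is the same over the dedup'd list
theorem find?_dedup (p : String → Bool) (F : List String) :
    (PySem.Set.ofList F).find? p = F.find? p := by
  induction F with
  | nil => simp
  | cons x t ih =>
    rw [PySem.Set.ofList_cons]
    by_cases hp : p x
    · rw [List.find?_cons_of_pos hp, List.find?_cons_of_pos hp]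
    · rw [List.find?_cons_of_neg (by simpa using hp), List.find?_cons_of_neg (by simpa using hp)]
      rw [find?_discard p _ x (by simpa using hp), ih]

-- ===== VERDICT (by name: the statement is the Claim_ definition above) =====
theorem identifikator_spec : Claim_equal_identifikator := by
  intro P N F _
  unfold Spec_identifikator identifikator identifikator_alt
  simp only [scoreA_eq]
  -- reduce B's score vector to a map of pvScore over the dedup'd keys
  rw [PySem.List.dedup_eq_ofList]
  set K := PySem.Set.ofList F with hK
  have h0 : List.replicate K.length (0 : Int) = K.map (fun _ => (0 : Int)) := by
    rw [List.map_const']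
  rw [h0, passPlus, passMinus]
  have hsc : (fun f => ((0 : Int) + (P.countP (fun d => PySem.Str.isIn f d) : Int))
        - (N.countP (fun d => PySem.Str.isIn f d) : Int)) = pvScore P N := by
    funext f
    have hfun : (fun d => PySem.Str.isIn f d) = fun p => PySem.Chars.isIn f.toList p.toList :=
      funext fun p => PySem.Str.isIn_eq f p
    simp only [pvScore, hfun, zero_add]
  rw [hsc]
  -- reduce B's selection fold over the zip to A's fold shape over K
  have hzip : K.zip (K.map (pvScore P N)) = K.map (fun f => (f, pvScore P N f)) := by
    have := List.zip_map' (f := id (α := String)) (g := pvScore P N) (l := K)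
    simpa using this
  rw [hzip, List.foldl_map, loopB_swap (pvScore P N) K 0 none,
      loopA_char (pvScore P N) F 0 none, loopA_char (pvScore P N) K 0 none]
  rw [hK, foldl_max_dedup (pvScore P N) F 0]
  by_cases hpos : (0 : Int) < (F.map (pvScore P N)).foldl max 0
  · rw [if_pos hpos, if_pos hpos]
    simp only [Prod.swap]
    rw [find?_dedup]
  · rw [if_neg hpos, if_neg hpos]
    rfl
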